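-- pv_equiv track=rewrite | github.com/cwjcw/daily_stock_info | scripts/db_maintainer.py | build_missing_ranges
-- ===== SOURCE A (Python) =====
-- from typing import Any, Dict, Iterable, List, Optional, Tuple
--
-- def build_missing_ranges(window_dates: List[str], missing_dates: List[str]) -> List[Tuple[str, str]]:
--     if not missing_dates:
--         return []
--     missing_set = set(missing_dates)
--     ranges: List[Tuple[str, str]] = []
--     start = None
--     prev = None
--     for d in window_dates:
--         if d in missing_set:
--             if start is None:
--                 start = d
--             prev = d
--         else:
--             if start is not None and prev is not None:
--                 ranges.append((start, prev))
--                 start = None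
--                 prev = None
--     if start is not None and prev is not None:
--         ranges.append((start, prev))
--     return ranges
-- ===== SOURCE B (Python) =====
-- def build_missing_ranges(window_dates, missing_dates):
--     missing = set(missing_dates)
--     ranges = []
--     n = len(window_dates)
--     i = 0
--     while i < n:
--         d = window_dates[i]
--         if d in missing:
--             j = i
--             while j + 1 < n and window_dates[j + 1] in missing:
--                 j += 1
--             ranges.append((d, window_dates[j]))
--             i = j + 1
--         else:
--             i += 1
--     return ranges
-- ===== Notes on version B (the rewrite author's own statement) =====
-- stated objective: alternative
-- what changed: Replaced A's single fold with Optional start/prev state variables by explicit run extraction: on hitting a missing date an inner scan finds the end of the contiguous run and emits (first, last) directly, with no option-valued state or final flush step.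
import Mathlib
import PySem

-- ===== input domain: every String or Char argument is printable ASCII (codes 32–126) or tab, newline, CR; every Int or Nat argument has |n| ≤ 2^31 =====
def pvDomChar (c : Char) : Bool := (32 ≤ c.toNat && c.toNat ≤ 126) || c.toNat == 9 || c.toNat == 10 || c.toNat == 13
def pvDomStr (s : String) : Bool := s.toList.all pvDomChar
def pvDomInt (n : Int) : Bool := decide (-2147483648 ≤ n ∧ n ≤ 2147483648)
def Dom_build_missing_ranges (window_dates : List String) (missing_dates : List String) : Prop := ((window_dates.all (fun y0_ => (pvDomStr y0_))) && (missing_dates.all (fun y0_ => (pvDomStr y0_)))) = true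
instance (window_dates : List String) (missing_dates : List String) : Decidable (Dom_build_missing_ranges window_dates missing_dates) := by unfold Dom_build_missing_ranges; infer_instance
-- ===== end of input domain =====

-- B replaces A's start/prev option-state fold by direct run extraction (inner scan to the
-- end of each contiguous missing run); alternative decomposition, same cost.

-- ===== PORT A =====
-- A's final flush step
def pvFinish (s : List (String × String) × Option String × Option String) : List (String × String) :=
  match s with
  | (ranges, some a, some b) => ranges ++ [(a, b)]
  | (ranges, _, _) => ranges

-- one loop step of A: state = (ranges, start, prev)
def pvAStep (mset : PySem.Set String) (s : List (String × String) × Option String × Option String)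
    (d : String) : List (String × String) × Option String × Option String :=
  let (ranges, start, prev) := s
  if PySem.Set.contains mset d then
    (ranges, (if start.isNone then some d else start), some d)
  else
    match start, prev with
    | some a, some b => (ranges ++ [(a, b)], none, none)
    | _, _ => (ranges, start, prev)

def build_missing_ranges (window_dates : List String) (missing_dates : List String) : List (String × String) :=
  if missing_dates = [] then []
  else
    let mset := PySem.Set.ofList missing_dates
    pvFinish (window_dates.foldl (pvAStep mset) ([], none, none))

-- ===== PORT B =====
-- inner while loop of B: scan forward while the next date is missing; returns (last of run, rest)
def pvBRun (mset : PySem.Set String) (last : String) : List String → String × List String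
  | [] => (last, [])
  | e :: es => if PySem.Set.contains mset e then pvBRun mset e es else (last, e :: es)

theorem pvBRun_rest_le (mset : PySem.Set String) (last : String) (l : List String) :
    (pvBRun mset last l).2.length ≤ l.length := by
  induction l generalizing last with
  | nil => simp [pvBRun]
  | cons e es ih =>
    simp only [pvBRun]
    split
    · exact le_trans (ih e) (Nat.le_succ _)
    · simp

-- outer while loop of B over the remaining suffix of window_dates
def pvBGo (mset : PySem.Set String) : List String → List (String × String)
  | [] => []
  | d :: rest =>
    if PySem.Set.contains mset d then
      let p := pvBRun mset d rest
      (d, p.1) :: pvBGo mset p.2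
    else pvBGo mset rest
termination_by l => l.length
decreasing_by
  · exact Nat.lt_succ_of_le (pvBRun_rest_le _ _ _)
  · simp

def build_missing_ranges_alt (window_dates : List String) (missing_dates : List String) : List (String × String) :=
  pvBGo (PySem.Set.ofList missing_dates) window_dates

-- ===== PRECONDITION & SPEC =====
def Spec_build_missing_ranges (window_dates : List String) (missing_dates : List String) (out : List (String × String)) : Prop := out = build_missing_ranges_alt window_dates missing_dates
instance (window_dates : List String) (missing_dates : List String) (out : List (String × String)) : Decidable (Spec_build_missing_ranges window_dates missing_dates out) := by unfold Spec_build_missing_ranges; infer_instance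

-- ===== CLAIM (what is proved, stated in full; the proofs are below) =====
def Claim_equal_build_missing_ranges : Prop := ∀ (window_dates : List String) (missing_dates : List String), Dom_build_missing_ranges window_dates missing_dates → Spec_build_missing_ranges window_dates missing_dates (build_missing_ranges window_dates missing_dates)

-- ===== LEMMAS AND PROOFS =====

-- joint loop invariant: A's fold from an idle state yields acc ++ B's run extraction,
-- and from an active run (start a, prev b) yields acc ++ the run closed off by pvBRun.
theorem pvInv (mset : PySem.Set String) (l : List String) :
    (∀ acc, pvFinish (l.foldl (pvAStep mset) (acc, none, none)) = acc ++ pvBGo mset l) ∧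
    (∀ acc a b, pvFinish (l.foldl (pvAStep mset) (acc, some a, some b)) =
      acc ++ (a, (pvBRun mset b l).1) :: pvBGo mset (pvBRun mset b l).2) := by
  induction l with
  | nil => simp [pvFinish, pvBGo, pvBRun]
  | cons d rest ih =>
    constructor
    · intro acc
      by_cases h : PySem.Set.contains mset d = true
      · simp only [List.foldl_cons, pvAStep, h, if_true, Option.isNone_none, pvBGo]
        exact ih.2 acc d d
      · simp only [List.foldl_cons, pvAStep, h, if_false, pvBGo, Bool.false_eq_true]
        exact ih.1 acc
    · intro acc a b
      by_cases h : PySem.Set.contains mset d = true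
      · simp only [List.foldl_cons, pvAStep, h, if_true, Option.isNone_some, pvBRun]
        exact ih.2 acc a d
      · simp only [List.foldl_cons, pvAStep, h, if_false, pvBRun, Bool.false_eq_true]
        rw [ih.1 (acc ++ [(a, b)])]
        have h' : mset.contains d = false := eq_false_of_ne_true h
        conv_rhs => rw [pvBGo.eq_def]
        simp only [h', Bool.false_eq_true, if_false, List.append_assoc, List.singleton_append]
theorem pvBGo_empty (l : List String) : pvBGo (PySem.Set.ofList []) l = [] := by
  induction l with
  | nil => rw [pvBGo.eq_def]
  | cons d rest ih =>
    rw [pvBGo.eq_def]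
    simpa [PySem.Set.contains, PySem.Set.ofList] using ih

-- ===== VERDICT (by name: the statement is the Claim_ definition above) =====
theorem build_missing_ranges_spec : Claim_equal_build_missing_ranges := by
  intro w ms _
  unfold Spec_build_missing_ranges build_missing_ranges build_missing_ranges_alt
  by_cases hms : ms = []
  · simp only [hms, if_true]
    exact (pvBGo_empty w).symm
  · simp only [hms, if_false]
    have h1 := (pvInv (PySem.Set.ofList ms) w).1 []
    rwa [List.nil_append] at h1
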